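-- pv_equiv track=rewrite | github.com/VladimirBroucek/IST105-Assignment7 | bitwise_operations.py | bitwise_operations
-- ===== SOURCE A (Python) =====
-- def bitwise_operations(numbers):
--     if not numbers:
--         return "Error: No valid numbers provided."
--
--     and_result = numbers[0]
--     or_result = numbers[0]
--     xor_result = numbers[0]
--
--     for num in numbers[1:]:
--         and_result &= num
--         or_result |= num
--         xor_result ^= num
--
--     return and_result, or_result, xor_result
-- ===== SOURCE B (Python) =====
-- # B: divide-and-conquer — recursively split the list in half and combine the two
-- # halves' (AND, OR, XOR) results; correct because &, | and ^ are associative.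
-- def _combine(nums):
--     if len(nums) == 1:
--         x = nums[0]
--         return x, x, x
--     mid = len(nums) // 2
--     a1, o1, x1 = _combine(nums[:mid])
--     a2, o2, x2 = _combine(nums[mid:])
--     return a1 & a2, o1 | o2, x1 ^ x2
--
-- def bitwise_operations(numbers):
--     if not numbers:
--         return "Error: No valid numbers provided."
--     return _combine(numbers)
-- ===== Notes on version B (the rewrite author's own statement) =====
-- stated objective: alternative
-- what changed: Replaces A's single left-to-right loop with a fused triple accumulator by a recursive divide-and-conquer that halves the list and combines each half's (AND, OR, XOR) triple, relying on associativity of the three operators.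
import Mathlib
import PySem

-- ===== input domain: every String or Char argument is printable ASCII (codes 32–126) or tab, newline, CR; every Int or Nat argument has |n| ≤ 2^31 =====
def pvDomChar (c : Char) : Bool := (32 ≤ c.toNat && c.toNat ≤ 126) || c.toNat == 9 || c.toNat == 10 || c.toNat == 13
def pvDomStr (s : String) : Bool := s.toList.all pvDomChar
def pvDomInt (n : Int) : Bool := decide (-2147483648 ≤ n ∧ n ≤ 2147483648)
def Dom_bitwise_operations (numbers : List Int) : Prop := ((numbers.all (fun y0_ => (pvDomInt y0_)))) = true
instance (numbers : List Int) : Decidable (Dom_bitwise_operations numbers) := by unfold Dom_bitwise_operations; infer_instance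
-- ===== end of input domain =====

-- B replaces A's single fused left-to-right accumulator loop by a recursive
-- divide-and-conquer that halves the list and combines the two halves' results
-- (objective: alternative; correct by associativity of &, |, ^).

-- ===== PORT A =====
-- A: start all three accumulators at numbers[0], then fold the fused update over numbers[1:].
def bitwise_operations (numbers : List Int) : Int × Int × Int :=
  match numbers with
  | [] => (0, 0, 0)  -- unreachable under Pre_: Python returns an error STRING here
  | h :: t =>
    t.foldl (fun (acc : Int × Int × Int) num =>
      (PySem.Int.band acc.1 num, PySem.Int.bor acc.2.1 num, PySem.Int.bxor acc.2.2 num)) (h, h, h)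

-- ===== PORT B =====
-- _combine: if len == 1 return (x,x,x); else recurse on nums[:mid] and nums[mid:]
-- (slices with 0 ≤ mid ≤ len are exactly List.take / List.drop) and combine.
-- The [] case and the dependent if are only totality guards: Python never calls
-- _combine on [] (on [] it would not terminate, and B never reaches it).
def pvCombine : List Int → Int × Int × Int
  | [] => (0, 0, 0)  -- unreachable: _combine is never called on []
  | x :: rest =>
    if h1 : (x :: rest).length = 1 then (x, x, x)
    else
      let mid := (x :: rest).length / 2
      let r1 := pvCombine ((x :: rest).take mid)
      let r2 := pvCombine ((x :: rest).drop mid)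
      (PySem.Int.band r1.1 r2.1, PySem.Int.bor r1.2.1 r2.2.1, PySem.Int.bxor r1.2.2 r2.2.2)
termination_by l => l.length
decreasing_by
  all_goals (simp only [List.length_take, List.length_drop, List.length_cons] at h1 ⊢; omega)

def bitwise_operations_alt (numbers : List Int) : Int × Int × Int :=
  match numbers with
  | [] => (0, 0, 0)  -- unreachable under Pre_: Python returns an error STRING here
  | _ :: _ => pvCombine numbers

-- ===== PRECONDITION & SPEC =====
-- Pre_ excludes the empty list, on which A returns an error string rather than a tuple of ints.
def Pre_bitwise_operations (numbers : List Int) : Prop := numbers ≠ []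
instance (numbers : List Int) : Decidable (Pre_bitwise_operations numbers) := by
  unfold Pre_bitwise_operations; infer_instance
def pvWitness_bitwise_operations : List Int := [3, 5, 6]

def Spec_bitwise_operations (numbers : List Int) (out : Int × Int × Int) : Prop :=
  out = bitwise_operations_alt numbers
instance (numbers : List Int) (out : Int × Int × Int) : Decidable (Spec_bitwise_operations numbers out) := by
  unfold Spec_bitwise_operations; infer_instance

-- ===== CLAIM =====
def Claim_equal_bitwise_operations : Prop := ∀ (numbers : List Int),
  Dom_bitwise_operations numbers → Pre_bitwise_operations numbers →
    Spec_bitwise_operations numbers (bitwise_operations numbers)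

-- ===== LEMMAS AND PROOFS =====

theorem and_mod_two (a b : Nat) : (a &&& b) % 2 = a % 2 * (b % 2) := by
  have h := Nat.testBit_and a b 0
  simp only [Nat.testBit_zero] at h
  rcases Nat.mod_two_eq_zero_or_one a with h1|h1 <;> rcases Nat.mod_two_eq_zero_or_one b with h2|h2 <;>
    rcases Nat.mod_two_eq_zero_or_one (a &&& b) with h3|h3 <;> simp [h1,h2,h3] at h ⊢

theorem sub_and_xor : ∀ m k : Nat, m &&& k = k → m - k = m ^^^ k := by
  intro m
  induction m using Nat.strong_induction_on with
  | _ m ih =>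
    intro k hk
    rcases Nat.eq_zero_or_pos m with hm|hm
    · subst hm
      have : k = 0 := by simpa using hk.symm
      simp [this]
    · have hdiv : m / 2 &&& k / 2 = k / 2 := by
        rw [← Nat.and_div_two, hk]
      have ihd := ih (m / 2) (by omega) (k / 2) hdiv
      have hmod : k % 2 ≤ m % 2 := by
        have := and_mod_two m k
        rw [hk] at this
        rcases Nat.mod_two_eq_zero_or_one m with h1|h1 <;> simp [h1] at this <;> omega
      have hxd : (m ^^^ k) / 2 = m / 2 ^^^ k / 2 := Nat.xor_div_two
      have hxm : (m ^^^ k) % 2 = (m + k) % 2 := Nat.xor_mod_two_eq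
      have hle : k ≤ m := hk ▸ Nat.and_le_left
      have h2 : k / 2 ≤ m / 2 := by
        have : k / 2 &&& m / 2 ≤ m / 2 := Nat.and_le_right
        rwa [Nat.land_comm, hdiv] at this
      omega

theorem sub_and_eq_ldiff (m n : Nat) : m - (m &&& n) = Nat.ldiff m n := by
  have hsub : m &&& (m &&& n) = m &&& n := by
    rw [← Nat.land_assoc, Nat.and_self]
  rw [sub_and_xor m (m &&& n) hsub]
  apply Nat.eq_of_testBit_eq
  intro i
  simp only [Nat.testBit_xor, Nat.testBit_and, Nat.testBit_ldiff]
  cases m.testBit i <;> cases n.testBit i <;> rfl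

theorem band_eq_land (a b : Int) : PySem.Int.band a b = Int.land a b := by
  cases a with
  | ofNat m => cases b with
    | ofNat n => simp [PySem.Int.band, Int.land]
    | negSucc n =>
      simp [PySem.Int.band, Int.land, Int.negSucc_eq, sub_and_eq_ldiff]
      intro h; exfalso; omega
  | negSucc m => cases b with
    | ofNat n =>
      simp [PySem.Int.band, Int.land, Int.negSucc_eq, sub_and_eq_ldiff]
      intro h; exfalso; omega
    | negSucc n =>
      simp [PySem.Int.band, Int.land, Int.negSucc_eq]
      omega

theorem bor_eq_lor (a b : Int) : PySem.Int.bor a b = Int.lor a b := by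
  cases a with
  | ofNat m => cases b with
    | ofNat n => simp [PySem.Int.bor, Int.lor]
    | negSucc n =>
      simp [PySem.Int.bor, Int.lor, Int.negSucc_eq, sub_and_eq_ldiff]
      split_ifs with h
      · exfalso; omega
      · ring
  | negSucc m => cases b with
    | ofNat n =>
      simp [PySem.Int.bor, Int.lor, Int.negSucc_eq, sub_and_eq_ldiff]
      split_ifs with h
      · exfalso; omega
      · ring
    | negSucc n =>
      simp [PySem.Int.bor, Int.lor, Int.negSucc_eq]
      omega

theorem bxor_eq_xor (a b : Int) : PySem.Int.bxor a b = Int.xor a b := by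
  cases a with
  | ofNat m => cases b with
    | ofNat n => simp [PySem.Int.bxor, Int.xor]
    | negSucc n =>
      simp [PySem.Int.bxor, Int.xor, Int.negSucc_eq]
      omega
  | negSucc m => cases b with
    | ofNat n =>
      simp [PySem.Int.bxor, Int.xor, Int.negSucc_eq]
      omega
    | negSucc n =>
      simp [PySem.Int.bxor, Int.xor, Int.negSucc_eq]
      omega

theorem int_eq_of_testBit {m n : Int} (h : ∀ k, m.testBit k = n.testBit k) : m = n := by
  cases m with
  | ofNat a => cases n with
    | ofNat b =>
      have : a = b := Nat.eq_of_testBit_eq (fun i => by simpa [Int.testBit] using h i)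
      simp [this]
    | negSucc b =>
      exfalso
      have hk := h (a + b + 1)
      have ha : a.testBit (a + b + 1) = false :=
        Nat.testBit_lt_two_pow (lt_of_le_of_lt (by omega) Nat.lt_two_pow_self)
      have hb : b.testBit (a + b + 1) = false :=
        Nat.testBit_lt_two_pow (lt_of_le_of_lt (by omega) Nat.lt_two_pow_self)
      simp [Int.testBit, ha, hb] at hk
  | negSucc a => cases n with
    | ofNat b =>
      exfalso
      have hk := h (a + b + 1)
      have ha : a.testBit (a + b + 1) = false :=
        Nat.testBit_lt_two_pow (lt_of_le_of_lt (by omega) Nat.lt_two_pow_self)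
      have hb : b.testBit (a + b + 1) = false :=
        Nat.testBit_lt_two_pow (lt_of_le_of_lt (by omega) Nat.lt_two_pow_self)
      simp [Int.testBit, ha, hb] at hk
    | negSucc b =>
      have : a = b := Nat.eq_of_testBit_eq (fun i => by simpa [Int.testBit] using h i)
      simp [this]

theorem band_assoc (a b c : Int) :
    PySem.Int.band (PySem.Int.band a b) c = PySem.Int.band a (PySem.Int.band b c) := by
  simp only [band_eq_land]
  exact int_eq_of_testBit fun k => by
    simp only [Int.testBit_land, Bool.and_assoc]

theorem bor_assoc (a b c : Int) :
    PySem.Int.bor (PySem.Int.bor a b) c = PySem.Int.bor a (PySem.Int.bor b c) := by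
  simp only [bor_eq_lor]
  exact int_eq_of_testBit fun k => by
    simp only [Int.testBit_lor, Bool.or_assoc]

theorem bxor_assoc (a b c : Int) :
    PySem.Int.bxor (PySem.Int.bxor a b) c = PySem.Int.bxor a (PySem.Int.bxor b c) := by
  simp only [bxor_eq_xor]
  exact int_eq_of_testBit fun k => by
    simp only [Int.testBit_lxor, Bool.xor_assoc]

theorem foldl_op_assoc (op : Int → Int → Int)
    (hassoc : ∀ x y z, op (op x y) z = op x (op y z)) (l : List Int) :
    ∀ a b : Int, l.foldl op (op a b) = op a (l.foldl op b) := by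
  induction l with
  | nil => intro a b; rfl
  | cons h t ih => intro a b; simpa [List.foldl, hassoc] using ih a (op b h)

theorem fold1_append (op : Int → Int → Int)
    (hassoc : ∀ x y z, op (op x y) z = op x (op y z))
    (h1 : Int) (t1 : List Int) (h2 : Int) (t2 : List Int) :
    ((t1 ++ h2 :: t2).foldl op h1) = op (t1.foldl op h1) (t2.foldl op h2) := by
  rw [List.foldl_append, List.foldl_cons]
  exact foldl_op_assoc op hassoc t2 _ h2

theorem pvCombine_eq (nums : List Int) (hne : nums ≠ []) :
    pvCombine nums =
      ((nums.tail).foldl PySem.Int.band nums.headI,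
       (nums.tail).foldl PySem.Int.bor nums.headI,
       (nums.tail).foldl PySem.Int.bxor nums.headI) := by
  induction nums using pvCombine.induct with
  | case1 => exact absurd rfl hne
  | case2 x rest hlen =>
    have hr : rest = [] := by
      simpa using hlen
    subst hr
    simp [pvCombine]
  | case3 x rest hlen mid ih1 ih2 =>
    have hlen2 : 2 ≤ (x :: rest).length := by
      simp only [List.length_cons] at hlen ⊢; omega
    have hmid1 : 1 ≤ (x :: rest).length / 2 := by omega
    obtain ⟨mid', hmid⟩ : ∃ k, (x :: rest).length / 2 = k + 1 := ⟨_, (Nat.succ_pred_eq_of_pos hmid1).symm⟩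
    have htake : (x :: rest).take ((x :: rest).length / 2) = x :: rest.take mid' := by
      rw [hmid]; rfl
    have hdropeq : (x :: rest).drop ((x :: rest).length / 2) = rest.drop mid' := by
      rw [hmid]; rfl
    have hdrop_ne : rest.drop mid' ≠ [] := by
      have : mid' < rest.length := by
        simp only [List.length_cons] at hmid ⊢
        omega
      simp [List.drop_eq_nil_iff]
      omega
    obtain ⟨h2, t2, hd⟩ : ∃ h2 t2, rest.drop mid' = h2 :: t2 := by
      cases hdd : rest.drop mid' with
      | nil => exact absurd hdd hdrop_ne
      | cons a b => exact ⟨a, b, rfl⟩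
    have hrest : rest = rest.take mid' ++ h2 :: t2 := by
      conv_lhs => rw [← List.take_append_drop mid' rest]
      rw [hd]
    have hmid0 : mid = (x :: rest).length / 2 := rfl
    rw [pvCombine, dif_neg hlen]
    dsimp only
    rw [htake, hdropeq, hd]
    rw [hmid0, htake] at ih1
    rw [hmid0, hdropeq, hd] at ih2
    rw [ih1 (List.cons_ne_nil _ _), ih2 (List.cons_ne_nil _ _)]
    simp only [List.headI_cons, List.tail_cons]
    conv_rhs => rw [hrest]
    rw [fold1_append _ band_assoc, fold1_append _ bor_assoc, fold1_append _ bxor_assoc]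

theorem fused_foldl (t : List Int) (a o x : Int) :
    t.foldl (fun (acc : Int × Int × Int) num =>
      (PySem.Int.band acc.1 num, PySem.Int.bor acc.2.1 num, PySem.Int.bxor acc.2.2 num)) (a, o, x)
    = (t.foldl PySem.Int.band a, t.foldl PySem.Int.bor o, t.foldl PySem.Int.bxor x) := by
  induction t generalizing a o x with
  | nil => rfl
  | cons h t ih => simpa using ih (PySem.Int.band a h) (PySem.Int.bor o h) (PySem.Int.bxor x h)

-- ===== VERDICT =====
theorem bitwise_operations_spec : Claim_equal_bitwise_operations := by
  intro numbers _ hpre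
  unfold Spec_bitwise_operations bitwise_operations bitwise_operations_alt
  cases numbers with
  | nil => exact absurd rfl hpre
  | cons h t =>
    show _ = pvCombine (h :: t)
    dsimp only
    rw [fused_foldl, pvCombine_eq (h :: t) (List.cons_ne_nil _ _)]
    simp only [List.headI_cons, List.tail_cons]
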